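-- pv_equiv track=rewrite | github.com/FernandoPintoL/ms_ml_despacho | src/monitoring/drift_detector.py | _calculate_overall_severity
-- ===== SOURCE A (Python) =====
-- def _calculate_overall_severity(drifts: list) -> str:
--     """Calcular severidad general basada en drifts detectados"""
--     if not drifts:
--         return 'NONE'
--
--     severities = [d.get('severity', 'MEDIUM') for d in drifts]
--     if 'HIGH' in severities:
--         return 'HIGH'
--     elif 'MEDIUM' in severities:
--         return 'MEDIUM'
--     else:
--         return 'LOW'
-- ===== SOURCE B (Python) =====
-- def _calculate_overall_severity(drifts: list) -> str:
--     """Calcular severidad general basada en drifts detectados"""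
--     if not drifts:
--         return 'NONE'
--     rank = {'HIGH': 3, 'MEDIUM': 2}
--     name = {3: 'HIGH', 2: 'MEDIUM', 1: 'LOW'}
--     score = max(rank.get(d.get('severity', 'MEDIUM'), 1) for d in drifts)
--     return name[score]
-- ===== Notes on version B (the rewrite author's own statement) =====
-- stated objective: idiomatic
-- what changed: Replaced the three ordered membership scans over a materialized severities list by a rank map and a single max-reduction pass, mapping the maximal rank back to its name.
import Mathlib
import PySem

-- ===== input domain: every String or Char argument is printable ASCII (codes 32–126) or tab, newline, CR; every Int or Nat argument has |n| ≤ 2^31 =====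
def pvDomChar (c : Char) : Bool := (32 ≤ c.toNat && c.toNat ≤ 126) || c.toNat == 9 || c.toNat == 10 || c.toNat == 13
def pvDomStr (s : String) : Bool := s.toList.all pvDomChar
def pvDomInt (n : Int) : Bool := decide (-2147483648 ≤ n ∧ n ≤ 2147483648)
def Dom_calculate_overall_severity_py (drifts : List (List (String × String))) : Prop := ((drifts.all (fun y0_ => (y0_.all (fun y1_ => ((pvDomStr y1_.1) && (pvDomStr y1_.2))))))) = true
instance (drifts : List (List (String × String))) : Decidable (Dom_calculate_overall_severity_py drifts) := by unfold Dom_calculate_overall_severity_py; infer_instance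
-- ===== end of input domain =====

-- ===== PORT A =====
-- B replaces A's three ordered membership scans by a rank map and one max-reduction pass (idiomatic).
def calculate_overall_severity_py (drifts : List (List (String × String))) : String :=
  if drifts = [] then "NONE"
  else
    let severities := drifts.map (fun d => PySem.Dict.getD (PySem.Dict.mk d) "severity" "MEDIUM")
    if severities.contains "HIGH" then "HIGH"
    else if severities.contains "MEDIUM" then "MEDIUM"
    else "LOW"

-- ===== PORT B =====
-- rank.get(d.get('severity','MEDIUM'), 1) from Source B
def sevRank (d : List (String × String)) : Nat :=
  if PySem.Dict.getD (PySem.Dict.mk d) "severity" "MEDIUM" = "HIGH" then 3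
  else if PySem.Dict.getD (PySem.Dict.mk d) "severity" "MEDIUM" = "MEDIUM" then 2
  else 1

-- name[score] from Source B
def sevName (n : Nat) : String :=
  if n = 3 then "HIGH" else if n = 2 then "MEDIUM" else "LOW"

def calculate_overall_severity_py_alt (drifts : List (List (String × String))) : String :=
  match drifts with
  | [] => "NONE"
  | d :: ds => sevName (ds.foldl (fun acc e => max acc (sevRank e)) (sevRank d))

-- ===== PRECONDITION & SPEC =====
def Spec_calculate_overall_severity_py (drifts : List (List (String × String))) (out : String) : Prop := out = calculate_overall_severity_py_alt drifts
instance (drifts : List (List (String × String))) (out : String) : Decidable (Spec_calculate_overall_severity_py drifts out) := by unfold Spec_calculate_overall_severity_py; infer_instance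

-- ===== CLAIM (what is proved, stated in full; the proofs are below) =====
def Claim_equal_calculate_overall_severity_py : Prop := ∀ (drifts : List (List (String × String))), Dom_calculate_overall_severity_py drifts → Spec_calculate_overall_severity_py drifts (calculate_overall_severity_py drifts)

-- ===== LEMMAS AND PROOFS =====
theorem sevRank_bounds (d : List (String × String)) : 1 ≤ sevRank d ∧ sevRank d ≤ 3 := by
  unfold sevRank; split_ifs <;> omega

theorem sevRank_eq_three (d : List (String × String)) :
    (sevRank d = 3) ↔ PySem.Dict.getD (PySem.Dict.mk d) "severity" "MEDIUM" = "HIGH" := by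
  unfold sevRank; split_ifs <;> simp_all

theorem sevRank_eq_two (d : List (String × String)) :
    (sevRank d = 2) ↔ PySem.Dict.getD (PySem.Dict.mk d) "severity" "MEDIUM" = "MEDIUM" := by
  unfold sevRank; split_ifs <;> simp_all

-- the max-reduction over Nat ranks, characterised by membership of 3 and 2
theorem sevName_foldl_max (rs : List Nat) : ∀ (r : Nat), 1 ≤ r → r ≤ 3 →
    (∀ x ∈ rs, 1 ≤ x ∧ x ≤ 3) →
    sevName (rs.foldl (fun a b => max a b) r) =
      if r = 3 ∨ 3 ∈ rs then "HIGH" else if r = 2 ∨ 2 ∈ rs then "MEDIUM" else "LOW" := by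
  induction rs with
  | nil =>
    intro r h1 h3 _
    simp only [List.foldl_nil, List.not_mem_nil, or_false]
    rfl
  | cons a rs ih =>
    intro r h1 h3 hb
    have ha := hb a List.mem_cons_self
    have hrs : ∀ x ∈ rs, 1 ≤ x ∧ x ≤ 3 := fun x hx => hb x (List.mem_cons_of_mem a hx)
    rw [List.foldl_cons, ih (max r a) (by omega) (by omega) hrs]
    by_cases h3m : 3 ∈ rs <;> by_cases h2m : 2 ∈ rs <;>
      simp only [List.mem_cons, h3m, h2m, or_true, or_false] <;>
      split_ifs <;> first | rfl | omega

theorem foldB (l : List (List (String × String))) (r : Nat) :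
    l.foldl (fun acc e => max acc (sevRank e)) r =
      (l.map sevRank).foldl (fun a b => max a b) r := by
  induction l generalizing r with
  | nil => rfl
  | cons a l ih => rw [List.foldl_cons, List.map_cons, List.foldl_cons, ih]

theorem memH (l : List (List (String × String))) :
    ((l.map (fun d => PySem.Dict.getD (PySem.Dict.mk d) "severity" "MEDIUM")).contains "HIGH" = true) ↔
      3 ∈ l.map sevRank := by
  simp only [List.contains_iff_mem, List.mem_map]
  constructor
  · rintro ⟨d, hd, hEq⟩; exact ⟨d, hd, (sevRank_eq_three d).mpr hEq⟩
  · rintro ⟨d, hd, hEq⟩; exact ⟨d, hd, (sevRank_eq_three d).mp hEq⟩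

theorem memM (l : List (List (String × String))) :
    ((l.map (fun d => PySem.Dict.getD (PySem.Dict.mk d) "severity" "MEDIUM")).contains "MEDIUM" = true) ↔
      2 ∈ l.map sevRank := by
  simp only [List.contains_iff_mem, List.mem_map]
  constructor
  · rintro ⟨d, hd, hEq⟩; exact ⟨d, hd, (sevRank_eq_two d).mpr hEq⟩
  · rintro ⟨d, hd, hEq⟩; exact ⟨d, hd, (sevRank_eq_two d).mp hEq⟩

theorem sevCondH (d : List (String × String)) (ds : List (List (String × String))) :
    ((((d :: ds).map (fun d => PySem.Dict.getD (PySem.Dict.mk d) "severity" "MEDIUM")).contains "HIGH") = true) ↔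
      (sevRank d = 3 ∨ 3 ∈ ds.map sevRank) := by
  simp only [List.map_cons, List.contains_cons, Bool.or_eq_true, beq_iff_eq, memH]
  constructor
  · rintro (h | h)
    · exact Or.inl ((sevRank_eq_three d).mpr h.symm)
    · exact Or.inr h
  · rintro (h | h)
    · exact Or.inl ((sevRank_eq_three d).mp h).symm
    · exact Or.inr h

theorem sevCondM (d : List (String × String)) (ds : List (List (String × String))) :
    ((((d :: ds).map (fun d => PySem.Dict.getD (PySem.Dict.mk d) "severity" "MEDIUM")).contains "MEDIUM") = true) ↔
      (sevRank d = 2 ∨ 2 ∈ ds.map sevRank) := by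
  simp only [List.map_cons, List.contains_cons, Bool.or_eq_true, beq_iff_eq, memM]
  constructor
  · rintro (h | h)
    · exact Or.inl ((sevRank_eq_two d).mpr h.symm)
    · exact Or.inr h
  · rintro (h | h)
    · exact Or.inl ((sevRank_eq_two d).mp h).symm
    · exact Or.inr h

-- ===== VERDICT (by name: the statement is the Claim_ definition above) =====
theorem calculate_overall_severity_py_spec : Claim_equal_calculate_overall_severity_py := by
  intro drifts _
  unfold Spec_calculate_overall_severity_py
  cases drifts with
  | nil => rfl
  | cons d ds =>
    show calculate_overall_severity_py (d :: ds) =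
      sevName (ds.foldl (fun acc e => max acc (sevRank e)) (sevRank d))
    have hd := sevRank_bounds d
    have hbs : ∀ x ∈ ds.map sevRank, 1 ≤ x ∧ x ≤ 3 := by
      intro x hx
      obtain ⟨e, _, rfl⟩ := List.mem_map.mp hx
      exact sevRank_bounds e
    rw [foldB, sevName_foldl_max (ds.map sevRank) (sevRank d) hd.1 hd.2 hbs]
    unfold calculate_overall_severity_py
    rw [if_neg (by simp)]
    exact if_congr (sevCondH d ds) rfl (if_congr (sevCondM d ds) rfl rfl)
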